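-- pv_equiv track=rewrite | github.com/JMartynov/github-secret-report | scripts/run_daily_scan.py | get_next_repos
-- ===== SOURCE A (Python) =====
-- def get_next_repos(repos, current_index, count):
--     num_repos = len(repos)
--     selected = []
--     if num_repos == 0:
--         return selected, current_index
--
--     for i in range(count):
--         idx = (current_index + i) % num_repos
--         selected.append(repos[idx])
--
--     new_index = (current_index + count) % num_repos
--     return selected, new_index
-- ===== SOURCE B (Python) =====
-- def get_next_repos(repos, current_index, count):
--     n = len(repos)
--     if n == 0:
--         return [], current_index
--     new_index = (current_index + count) % n
--     if count <= 0:
--         return [], new_index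
--     start = current_index % n
--     rotated = repos[start:] + repos[:start]
--     selected = (rotated * (count // n + 1))[:count]
--     return selected, new_index
-- ===== Notes on version B (the rewrite author's own statement) =====
-- stated objective: idiomatic
-- what changed: Replaces the per-element loop computing (current_index+i) % n for each i by one rotation of the list (two slices) that is tiled count//n+1 times and truncated to count, with the modular arithmetic done once.
import Mathlib
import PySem

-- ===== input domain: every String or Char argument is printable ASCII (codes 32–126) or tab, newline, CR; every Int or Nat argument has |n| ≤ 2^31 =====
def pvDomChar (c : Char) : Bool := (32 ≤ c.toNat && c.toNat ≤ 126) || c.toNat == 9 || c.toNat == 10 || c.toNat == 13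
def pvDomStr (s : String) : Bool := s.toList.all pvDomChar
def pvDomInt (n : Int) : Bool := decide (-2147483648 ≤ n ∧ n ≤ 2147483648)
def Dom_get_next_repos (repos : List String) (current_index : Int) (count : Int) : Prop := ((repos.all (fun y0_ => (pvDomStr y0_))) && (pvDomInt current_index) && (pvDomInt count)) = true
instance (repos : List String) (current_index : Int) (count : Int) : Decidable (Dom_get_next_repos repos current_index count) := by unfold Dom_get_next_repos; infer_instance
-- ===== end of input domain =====

-- B replaces A's per-element modular-index loop by one rotation (two slices) tiled and truncated; objective: idiomatic/alternative, same cost.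

-- ===== PORT A =====
-- repos[idx]: idx = (current_index + i) % num_repos is always in range for num_repos > 0,
-- so pyGetD with a dummy default is exact here.
def get_next_repos (repos : List String) (current_index : Int) (count : Int) : List String × Int :=
  let num_repos : Int := (repos.length : Int)
  if num_repos == 0 then
    ([], current_index)
  else
    let selected := (PySem.List.pyRange 0 count 1).foldl
      (fun acc i => acc ++ [PySem.List.pyGetD repos (PySem.Int.mod (current_index + i) num_repos) ""]) []
    (selected, PySem.Int.mod (current_index + count) num_repos)

-- ===== PORT B =====
def get_next_repos_alt (repos : List String) (current_index : Int) (count : Int) : List String × Int :=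
  let n : Int := (repos.length : Int)
  if n == 0 then
    ([], current_index)
  else
    let new_index := PySem.Int.mod (current_index + count) n
    if count ≤ 0 then
      ([], new_index)
    else
      let start := PySem.Int.mod current_index n
      let rotated := PySem.List.slice repos (some start) none ++ PySem.List.slice repos none (some start)
      let selected := PySem.List.slice (PySem.List.pyRepeat rotated (PySem.Int.floordiv count n + 1)) none (some count)
      (selected, new_index)

-- ===== PRECONDITION & SPEC =====
def Spec_get_next_repos (repos : List String) (current_index : Int) (count : Int) (out : List String × Int) : Prop := out = get_next_repos_alt repos current_index count
instance (repos : List String) (current_index : Int) (count : Int) (out : List String × Int) : Decidable (Spec_get_next_repos repos current_index count out) := by unfold Spec_get_next_repos; infer_instance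

-- ===== CLAIM (what is proved, stated in full; the proofs are below) =====
def Claim_equal_get_next_repos : Prop := ∀ (repos : List String) (current_index : Int) (count : Int), Dom_get_next_repos repos current_index count → Spec_get_next_repos repos current_index count (get_next_repos repos current_index count)

-- ===== LEMMAS AND PROOFS =====

-- element i of a k-fold repetition of l is element (i % l.length) of l
theorem flatten_replicate_getElem? {α : Type} (l : List α) (k j : Nat) (hj : j < k * l.length) :
    (List.replicate k l).flatten[j]? = l[j % l.length]? := by
  induction k generalizing j with
  | zero => omega
  | succ k ih =>
    rw [List.replicate_succ, List.flatten_cons]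
    rw [Nat.succ_mul] at hj
    by_cases h : j < l.length
    · rw [List.getElem?_append_left h, Nat.mod_eq_of_lt h]
    · have hl : 0 < l.length := by
        rcases Nat.eq_zero_or_pos l.length with h0 | h0
        · rw [h0] at hj; simp at hj
        · exact h0
      rw [List.getElem?_append_right (by omega)]
      rw [ih (j - l.length) (by omega)]
      congr 1
      conv_rhs => rw [Nat.mod_eq_sub_mod (show l.length ≤ j by omega)]

-- element m of the rotation drop s ++ take s is element (s + m) % length of the original
theorem rotated_getElem? {α : Type} (xs : List α) (s m : Nat) (hs : s ≤ xs.length)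
    (hm : m < xs.length) :
    (xs.drop s ++ xs.take s)[m]? = xs[(s + m) % xs.length]? := by
  by_cases h : m < xs.length - s
  · rw [List.getElem?_append_left (by simpa using (by omega : m < xs.length - s))]
    rw [List.getElem?_drop]
    congr 1
    exact (Nat.mod_eq_of_lt (by omega)).symm
  · rw [List.getElem?_append_right (by simp; omega)]
    simp only [List.length_drop]
    rw [List.getElem?_take_of_lt (by omega)]
    congr 1
    have h2 : (s + m) % xs.length = (s + m - xs.length) % xs.length :=
      Nat.mod_eq_sub_mod (by omega)
    rw [h2, Nat.mod_eq_of_lt (by omega)]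
    omega

-- ===== VERDICT (by name: the statement is the Claim_ definition above) =====
theorem get_next_repos_spec : Claim_equal_get_next_repos := by
  intro repos c count _
  unfold Spec_get_next_repos get_next_repos get_next_repos_alt
  set N := repos.length with hNdef
  by_cases hz : N = 0
  · simp [hz]
  · have hN : 0 < N := by omega
    have hNpos : (0:Int) < (N:Int) := by exact_mod_cast hN
    have hcond : ((N:Int) == 0) = false := by simp; omega
    simp only [hcond, Bool.false_eq_true, if_false]
    by_cases hc : count ≤ 0
    · simp only [if_pos hc]
      refine Prod.ext ?_ rfl
      rw [PySem.List.pyRange_one_eq_nil hc]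
      rfl
    · simp only [if_neg hc]
      rw [not_le] at hc
      refine Prod.ext ?_ rfl
      -- A's loop is a map over the range
      rw [PySem.List.foldl_append_singleton_eq_map, List.nil_append, PySem.List.pyRange_one,
        List.map_map]
      -- B's start index as a Nat
      have hstart_nonneg : 0 ≤ PySem.Int.mod c (N : Int) := PySem.Int.mod_nonneg _ hNpos
      have hstart_lt : PySem.Int.mod c (N : Int) < (N : Int) := PySem.Int.mod_lt _ hNpos
      set s := (PySem.Int.mod c (N : Int)).toNat with hsdef
      have hscast : PySem.Int.mod c (N : Int) = ((s : Nat) : Int) := by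
        rw [hsdef, Int.toNat_of_nonneg hstart_nonneg]
      have hsle : s ≤ N := by omega
      rw [hscast, PySem.List.slice_from_natCast, PySem.List.slice_to_natCast]
      -- B's truncation is a take
      set M := count.toNat with hMdef
      have hccast : count = ((M : Nat) : Int) := by omega
      have hslice : ∀ (xs : List String),
          PySem.List.slice xs none (some count) = xs.take M := by
        intro xs
        conv_lhs => rw [hccast]
        rw [PySem.List.slice_to_natCast]
      rw [hslice]
      -- the repetition factor covers M elements
      have hq0 : 0 ≤ PySem.Int.floordiv count (N : Int) := by
        rw [PySem.Int.le_floordiv_iff_mul_le hNpos]; omega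
      set K := (PySem.Int.floordiv count (N : Int) + 1).toNat with hKdef
      have hKcast : ((K : Nat) : Int) = PySem.Int.floordiv count (N : Int) + 1 := by
        rw [hKdef, Int.toNat_of_nonneg (by omega)]
      have hKN : M < K * N := by
        have h1 := PySem.Int.floordiv_mul_add_mod count (N : Int)
        have h2 := PySem.Int.mod_lt count hNpos
        have hlt : (count : Int) < ((K : Nat) : Int) * (N : Int) := by
          rw [hKcast]; nlinarith
        have hlt2 : ((M : Nat) : Int) < (((K * N : Nat) : Nat) : Int) := by
          push_cast
          linarith [hlt, hccast]
        exact_mod_cast hlt2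
      -- rotated list and its length
      set rot := (repos.drop s ++ repos.take s) with hrotdef
      have hrotlen : rot.length = N := by
        rw [hrotdef]; simp; omega
      -- elementwise comparison
      apply List.ext_getElem?
      intro i
      by_cases hi : i < M
      · rw [List.getElem?_map, List.getElem?_range (by omega)]
        rw [PySem.List.pyRepeat, List.getElem?_take_of_lt hi]
        rw [flatten_replicate_getElem? rot K i (by rw [hrotlen]; omega)]
        rw [hrotlen]
        rw [rotated_getElem? repos s (i % N) hsle (Nat.mod_lt _ hN)]
        -- left element: pyGetD at the in-range modular index
        have hidx_nonneg : 0 ≤ PySem.Int.mod (c + (0 + (i:Int))) (N : Int) :=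
          PySem.Int.mod_nonneg _ hNpos
        have hidx_lt : PySem.Int.mod (c + (0 + (i:Int))) (N : Int) < (N : Int) :=
          PySem.Int.mod_lt _ hNpos
        simp only [Option.map_some, Function.comp_apply]
        rw [PySem.List.pyGetD_eq_getElem _ _ hidx_nonneg (by rw [← hNdef]; omega)]
        rw [List.getElem?_eq_getElem (by rw [← hNdef]; exact Nat.mod_lt _ hN)]
        congr 1
        -- index arithmetic: ((c + (0 + i)) mod N).toNat = (s + i % N) % N
        have hmod : PySem.Int.mod (c + (0 + (i:Int))) (N : Int) = (c + (i:Int)) % (N : Int) := by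
          rw [PySem.Int.mod_eq_emod_of_pos hNpos]; ring_nf
        have hsmod : PySem.Int.mod c (N : Int) = c % (N : Int) :=
          PySem.Int.mod_eq_emod_of_pos hNpos
        have key : (c + (i:Int)) % (N : Int) = (((s + i % N) % N : Nat) : Int) := by
          rw [Int.add_emod, ← hsmod, hscast]
          push_cast
          ring_nf
        simp only [hmod, key, Int.toNat_natCast]
        rfl
      · rw [List.getElem?_eq_none (by simp; omega)]
        rw [List.getElem?_eq_none (by simp; omega)]
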